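-- pv_equiv track=rewrite | github.com/OrangeFruit-cmd/Arduino-Projects-2020 | Module_3_Solutions.py | binaryCounter
-- ===== SOURCE A (Python) =====
-- def binaryCounter(n):
--     """ Generates a list of binary counting strings up to the input number
--     """
--     if type(n) is not int:
--         raise TypeError("Input an integer only")
--
--     # YOUR CODE HERE
--     elif n<0:
--         return []
--
--     else:
--         binary_counter=[]
--         for x in range(n+1):
--             Counter=[bin(x)[2:]]
--             binary_counter.extend(Counter)
--         return binary_counter
-- ===== SOURCE B (Python) =====
-- def binaryCounter(n):
--     """ Generates a list of binary counting strings up to the input number """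
--     if type(n) is not int:
--         raise TypeError("Input an integer only")
--     if n < 0:
--         return []
--     out = []
--     for x in range(n + 1):
--         if x == 0:
--             out.append('0')
--         else:
--             digits = []
--             y = x
--             while y:
--                 digits.append('1' if y % 2 else '0')
--                 y //= 2
--             out.append(''.join(reversed(digits)))
--     return out
-- ===== Notes on version B (the rewrite author's own statement) =====
-- stated objective: alternative
-- what changed: B replaces the bin(x)[2:] library-call-and-slice with a hand-rolled conversion: repeated division by 2 collects the bits least-significant-first, which are then reversed and joined (x==0 yields '0' directly).
import Mathlib
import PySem

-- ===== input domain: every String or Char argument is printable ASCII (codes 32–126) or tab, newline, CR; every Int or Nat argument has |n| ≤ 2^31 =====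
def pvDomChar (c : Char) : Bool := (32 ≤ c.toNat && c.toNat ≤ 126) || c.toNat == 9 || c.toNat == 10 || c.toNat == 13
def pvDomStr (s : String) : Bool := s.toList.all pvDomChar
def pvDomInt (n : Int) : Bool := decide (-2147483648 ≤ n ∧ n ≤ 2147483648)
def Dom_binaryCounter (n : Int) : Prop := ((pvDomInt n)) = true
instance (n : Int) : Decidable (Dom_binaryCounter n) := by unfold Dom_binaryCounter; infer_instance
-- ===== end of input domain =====

-- B replaces bin(x)[2:] with a hand-rolled repeated-division bit collection (reversed and joined);
-- same return value everywhere (the `type(n) is not int` TypeError is unreachable for an Int argument).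

-- ===== PORT A =====
-- for x in range(n+1): binary_counter.extend([bin(x)[2:]])
def binaryCounter (n : Int) : List String :=
  if n < 0 then []
  else
    (PySem.List.pyRange 0 (n + 1) 1).foldl
      (fun acc x => acc ++ [PySem.Str.slice (PySem.Int.pyBin x) (some 2) none]) []

-- ===== PORT B =====
-- the while loop of Source B: collect '1'/'0' for y % 2, y //= 2, least-significant bit first
def altDigits (m : Nat) : List Char :=
  if m = 0 then [] else (if m % 2 = 1 then '1' else '0') :: altDigits (m / 2)
  decreasing_by exact Nat.div_lt_self (Nat.pos_of_ne_zero (by assumption)) (by norm_num)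

def binaryCounter_alt (n : Int) : List String :=
  if n < 0 then []
  else
    (PySem.List.pyRange 0 (n + 1) 1).foldl
      (fun acc x =>
        acc ++ [if x = 0 then "0" else String.ofList (altDigits x.toNat).reverse]) []

-- ===== PRECONDITION & SPEC =====
def Spec_binaryCounter (n : Int) (out : List String) : Prop := out = binaryCounter_alt n
instance (n : Int) (out : List String) : Decidable (Spec_binaryCounter n out) := by unfold Spec_binaryCounter; infer_instance

-- ===== CLAIM (what is proved, stated in full; the proofs are below) =====
def Claim_equal_binaryCounter : Prop := ∀ (n : Int), Dom_binaryCounter n → Spec_binaryCounter n (binaryCounter n)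

-- ===== LEMMAS AND PROOFS =====

-- MSB-first recursion that `Nat.toDigitsCore` implements once it has enough fuel
def msbRep (m : Nat) : List Char :=
  if m / 2 = 0 then [(m % 2).digitChar]
  else msbRep (m / 2) ++ [(m % 2).digitChar]
  decreasing_by exact Nat.div_lt_self (by omega) (by norm_num)

theorem toDigitsCore_eq_msbRep (f : Nat) : ∀ (m : Nat) (ds : List Char), m < f →
    Nat.toDigitsCore 2 f m ds = msbRep m ++ ds := by
  induction f with
  | zero => intro m ds h; omega
  | succ f ih =>
    intro m ds h
    rw [Nat.toDigitsCore, msbRep]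
    by_cases h2 : m / 2 = 0
    · simp [h2]
    · simp only [h2]
      rw [ih (m / 2) _ (by omega)]
      simp

theorem toDigits_eq_msbRep (m : Nat) : Nat.toDigits 2 m = msbRep m := by
  rw [Nat.toDigits, toDigitsCore_eq_msbRep (m + 1) m [] (by omega)]
  simp

theorem msbRep_eq_altDigits_reverse (m : Nat) (hm : m ≠ 0) :
    msbRep m = (altDigits m).reverse := by
  induction m using Nat.strong_induction_on with
  | _ m ih =>
    rw [msbRep, altDigits, if_neg hm]
    by_cases h2 : m / 2 = 0
    · have h1 : m = 1 := by omega
      subst h1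
      norm_num
      rw [altDigits]
      decide
    · rw [if_neg h2, ih (m / 2) (Nat.div_lt_self (by omega) (by norm_num)) h2]
      have : m % 2 = 1 ∨ m % 2 = 0 := by omega
      rcases this with h | h <;> simp [h] <;> decide

-- per-element agreement: bin(x)[2:] = B's hand-rolled string, for 0 ≤ x
theorem elem_eq (x : Int) (hx : 0 ≤ x) :
    PySem.Str.slice (PySem.Int.pyBin x) (some 2) none
      = (if x = 0 then "0" else String.ofList (altDigits x.toNat).reverse) := by
  have hneg : ¬ x < 0 := by omega
  rw [PySem.Str.slice]
  rw [PySem.Int.toList_pyBin, PySem.Int.toBinChars0b, if_neg hneg]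
  rw [PySem.Chars.slice, show ((2 : Int) = ((2 : Nat) : Int)) from rfl, PySem.List.slice_from_natCast]
  simp only [List.drop_succ_cons, List.drop_zero]
  rw [toDigits_eq_msbRep]
  by_cases h0 : x = 0
  · subst h0
    rw [if_pos rfl, show (Int.toNat 0) = 0 from rfl, msbRep]
    rfl
  · rw [if_neg h0, msbRep_eq_altDigits_reverse x.toNat (by omega)]

-- ===== VERDICT (by name: the statement is the Claim_ definition above) =====
theorem binaryCounter_spec : Claim_equal_binaryCounter := by
  intro n _
  unfold Spec_binaryCounter binaryCounter binaryCounter_alt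
  by_cases hn : n < 0
  · simp [hn]
  · simp only [if_neg hn]
    apply PySem.List.foldl_congr_mem
    intro acc x hx
    have hx0 : 0 ≤ x := by
      have := (PySem.List.mem_pyRange_one.mp hx).1
      omega
    rw [elem_eq x hx0]
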